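-- pv_equiv track=rewrite | github.com/MrBrantCode/unitest_baseline | mut_generate/mist_train_taco/taco_5770/solution.py | find_longest_increasing_subsegment_length
-- ===== SOURCE A (Python) =====
-- def find_longest_increasing_subsegment_length(n, sequence):
--     if n == 1:
--         return 1
--
--     leftList = [1] * n
--     rightList = [1] * n
--     ans = 0
--
--     # Calculate leftList
--     for i in range(1, n):
--         if sequence[i - 1] < sequence[i]:
--             leftList[i] = leftList[i - 1] + 1
--         ans = max(ans, leftList[i])
--
--     # If the longest increasing subsegment is the entire sequence, we can only change one element
--     if ans < n:
--         ans += 1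
--
--     # Calculate rightList
--     for i in range(n - 2, -1, -1):
--         if sequence[i + 1] > sequence[i]:
--             rightList[i] = rightList[i + 1] + 1
--
--     # Check for the possibility of changing one element to make a longer subsegment
--     for i in range(1, n - 1):
--         if sequence[i + 1] - sequence[i - 1] >= 2:
--             ans = max(ans, leftList[i - 1] + 1 + rightList[i + 1])
--
--     return ans
-- ===== SOURCE B (Python) =====
-- def find_longest_increasing_subsegment_length(n, sequence):
--     # Single left-to-right pass with scalar state; no leftList/rightList arrays.
--     if n == 1:
--         return 1
--     ans = 0
--     cur = 1   # length of increasing run ending at previous index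
--     a = 1     # best segment ending at previous index, change (if any) not at that index
--     b = 1     # best segment ending at previous index with its last element changed
--     for i in range(1, n):
--         inc = sequence[i - 1] < sequence[i]
--         new_cur = cur + 1 if inc else 1
--         new_b = cur + 1
--         new_a = max(new_cur, 2)
--         if inc:
--             new_a = max(new_a, a + 1)
--         if i == 1 or sequence[i] - sequence[i - 2] >= 2:
--             new_a = max(new_a, b + 1)
--         cur, a, b = new_cur, new_a, new_b
--         ans = max(ans, new_a, new_b)
--     return ans
-- ===== Notes on version B (the rewrite author's own statement) =====
-- stated objective: alternative
-- what changed: A's three array passes (forward leftList pass, backward rightList pass, then a join scan using both arrays) are replaced by a single left-to-right pass maintaining three scalars: the current increasing run length, the best segment ending here with the change strictly before the last element, and the best with the last element changed.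
import Mathlib
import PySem

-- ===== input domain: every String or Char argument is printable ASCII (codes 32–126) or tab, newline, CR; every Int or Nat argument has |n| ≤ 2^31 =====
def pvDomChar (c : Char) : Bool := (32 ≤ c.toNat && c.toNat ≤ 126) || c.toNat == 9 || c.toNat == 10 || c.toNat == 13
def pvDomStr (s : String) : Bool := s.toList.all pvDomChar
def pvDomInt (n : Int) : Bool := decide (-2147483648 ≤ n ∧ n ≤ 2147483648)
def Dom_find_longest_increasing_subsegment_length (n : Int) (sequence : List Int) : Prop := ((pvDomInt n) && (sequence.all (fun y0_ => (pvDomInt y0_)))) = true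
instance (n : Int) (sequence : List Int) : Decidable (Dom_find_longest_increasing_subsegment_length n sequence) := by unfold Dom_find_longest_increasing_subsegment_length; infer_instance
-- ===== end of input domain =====

-- ===== PORT A =====
-- B replaces A's three array passes (leftList, rightList, join scan) by one
-- left-to-right pass over scalar DP state; objective: alternative (same O(n)).

-- step of A's first loop: conditionally extend leftList[i], track the running max
def pvAStep1 (sequence : List Int) (st : List Int × Int) (i : Int) : List Int × Int :=
  let ll := if PySem.List.pyGetD sequence (i - 1) 0 < PySem.List.pyGetD sequence i 0
            then PySem.List.pySetD st.1 i (PySem.List.pyGetD st.1 (i - 1) 0 + 1) else st.1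
  (ll, max st.2 (PySem.List.pyGetD ll i 0))
def pvAStep2 (sequence : List Int) (rl : List Int) (i : Int) : List Int :=
  if PySem.List.pyGetD sequence (i + 1) 0 > PySem.List.pyGetD sequence i 0
  then PySem.List.pySetD rl i (PySem.List.pyGetD rl (i + 1) 0 + 1) else rl
def pvAStep3 (sequence leftList rightList : List Int) (ans : Int) (i : Int) : Int :=
  if PySem.List.pyGetD sequence (i + 1) 0 - PySem.List.pyGetD sequence (i - 1) 0 ≥ 2
  then max ans (PySem.List.pyGetD leftList (i - 1) 0 + 1 + PySem.List.pyGetD rightList (i + 1) 0)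
  else ans

def find_longest_increasing_subsegment_length (n : Int) (sequence : List Int) : Int :=
  if n = 1 then 1
  else
    let p1 := (PySem.List.pyRange 1 n 1).foldl (pvAStep1 sequence) (List.replicate n.toNat 1, 0)
    let ans := if p1.2 < n then p1.2 + 1 else p1.2
    let rightList := (PySem.List.pyRange (n - 2) (-1) (-1)).foldl (pvAStep2 sequence)
      (List.replicate n.toNat 1)
    (PySem.List.pyRange 1 (n - 1) 1).foldl (pvAStep3 sequence p1.1 rightList) ans


-- ===== PORT B =====
-- step of B's single loop; state = (ans, cur, a, b)
def pvBStep (sequence : List Int) (st : Int × Int × Int × Int) (i : Int) : Int × Int × Int × Int :=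
  let newCur := if PySem.List.pyGetD sequence (i - 1) 0 < PySem.List.pyGetD sequence i 0
                then st.2.1 + 1 else 1
  let newB := st.2.1 + 1
  let x1 := max newCur 2
  let x2 := if PySem.List.pyGetD sequence (i - 1) 0 < PySem.List.pyGetD sequence i 0
            then max x1 (st.2.2.1 + 1) else x1
  let newA := if i = 1 ∨ PySem.List.pyGetD sequence i 0 - PySem.List.pyGetD sequence (i - 2) 0 ≥ 2
              then max x2 (st.2.2.2 + 1) else x2
  (max (max st.1 newA) newB, newCur, newA, newB)

def find_longest_increasing_subsegment_length_alt (n : Int) (sequence : List Int) : Int :=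
  if n = 1 then 1
  else ((PySem.List.pyRange 1 n 1).foldl (pvBStep sequence) (0, 1, 1, 1)).1


-- ===== PRECONDITION & SPEC =====
-- Pre_ excludes exactly the inputs where Python A raises IndexError:
-- n >= 2 with fewer than n elements in `sequence`.
def Pre_find_longest_increasing_subsegment_length (n : Int) (sequence : List Int) : Prop :=
  n ≤ PySem.List.len sequence ∨ n ≤ 1
instance (n : Int) (sequence : List Int) : Decidable (Pre_find_longest_increasing_subsegment_length n sequence) := by unfold Pre_find_longest_increasing_subsegment_length; infer_instance

def pvWitness_find_longest_increasing_subsegment_length : Int × List Int := (5, [1, 7, 2, 3, 4])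

def Spec_find_longest_increasing_subsegment_length (n : Int) (sequence : List Int) (out : Int) : Prop := out = find_longest_increasing_subsegment_length_alt n sequence
instance (n : Int) (sequence : List Int) (out : Int) : Decidable (Spec_find_longest_increasing_subsegment_length n sequence out) := by unfold Spec_find_longest_increasing_subsegment_length; infer_instance

-- ===== CLAIM (what is proved, stated in full; the proofs are below) =====
def Claim_equal_find_longest_increasing_subsegment_length : Prop := ∀ (n : Int) (sequence : List Int), Dom_find_longest_increasing_subsegment_length n sequence → Pre_find_longest_increasing_subsegment_length n sequence → Spec_find_longest_increasing_subsegment_length n sequence (find_longest_increasing_subsegment_length n sequence)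

-- ===== LEMMAS AND PROOFS =====

-- Abstract view: with g u = sequence.getD u 0 (only indices < n are ever read),
-- every loop value of both programs is expressed by the recursions below, and the
-- equality of the two answers is proved over an arbitrary g.

def curF (g : ℕ → Int) : ℕ → Int
  | 0 => 1
  | i + 1 => if g i < g (i + 1) then curF g i + 1 else 1
def mF (g : ℕ → Int) : ℕ → Int
  | 0 => 0
  | i + 1 => max (mF g i) (curF g (i + 1))
def rlF (g : ℕ → Int) (N : ℕ) : ℕ → Int
  | 0 => 1
  | j + 1 => if g (N - 2 - j) < g (N - 1 - j) then rlF g N j + 1 else 1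
def rF (g : ℕ → Int) (N : ℕ) (i : ℕ) : Int := rlF g N (N - 1 - i)

def bF (g : ℕ → Int) : ℕ → Int
  | 0 => 1
  | i + 1 => curF g i + 1
def aF (g : ℕ → Int) : ℕ → Int
  | 0 => 1
  | i + 1 =>
    let x1 := max (if g i < g (i + 1) then curF g i + 1 else 1) 2
    let x2 := if g i < g (i + 1) then max x1 (aF g i + 1) else x1
    if i = 0 ∨ g (i + 1) - g (i - 1) ≥ 2 then max x2 (bF g i + 1) else x2
def ansBF (g : ℕ → Int) : ℕ → Int
  | 0 => 0
  | i + 1 => max (max (ansBF g i) (aF g (i + 1))) (bF g (i + 1))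
def baseF (g : ℕ → Int) (N : ℕ) : Int :=
  if mF g (N - 1) < (N : Int) then mF g (N - 1) + 1 else mF g (N - 1)
def tF (g : ℕ → Int) (N : ℕ) (base : Int) : ℕ → Int
  | 0 => base
  | k + 1 => if g (k + 2) - g k ≥ 2
             then max (tF g N base k) (curF g k + 1 + rF g N (k + 2))
             else tF g N base k

def llF (g : ℕ → Int) (N k : ℕ) : List Int :=
  (List.range N).map (fun t => if t ≤ k then curF g t else 1)
def rrF (g : ℕ → Int) (N j : ℕ) : List Int :=
  (List.range N).map (fun t => if j ≤ t then rF g N t else 1)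

theorem curF_ge_one (g : ℕ → Int) (i : ℕ) : 1 ≤ curF g i := by
  cases i with
  | zero => simp [curF]
  | succ j =>
    have := curF_ge_one g j
    simp only [curF]; split <;> omega

theorem curF_le (g : ℕ → Int) (i : ℕ) : curF g i ≤ (i : Int) + 1 := by
  induction i with
  | zero => simp [curF]
  | succ j ih => simp only [curF]; split <;> push_cast <;> omega

theorem mF_mono (g : ℕ → Int) {i j : ℕ} (h : i ≤ j) : mF g i ≤ mF g j := by
  induction j with
  | zero => interval_cases i; rfl
  | succ k ih =>
    rcases Nat.le_succ_iff.mp h with h' | h'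
    · exact le_trans (ih h') (le_max_left _ _)
    · subst h'; rfl

theorem curF_le_mF (g : ℕ → Int) {i j : ℕ} (h1 : 1 ≤ i) (h2 : i ≤ j) : curF g i ≤ mF g j := by
  have h3 : curF g i ≤ mF g i := by
    cases i with
    | zero => omega
    | succ k => simp only [mF]; exact le_max_right _ _
  exact le_trans h3 (mF_mono g h2)

theorem mF_ge_one (g : ℕ → Int) {j : ℕ} (h : 1 ≤ j) : 1 ≤ mF g j :=
  le_trans (curF_ge_one g 1) (curF_le_mF g le_rfl h)

theorem mF_attained (g : ℕ → Int) {j : ℕ} (h : 1 ≤ j) :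
    ∃ t, 1 ≤ t ∧ t ≤ j ∧ mF g j = curF g t := by
  induction j with
  | zero => omega
  | succ k ih =>
    rcases Nat.eq_zero_or_pos k with hk | hk
    · subst hk; exact ⟨1, le_rfl, le_rfl, by
        have := curF_ge_one g 1
        simp only [mF, Nat.zero_add]; omega⟩
    · obtain ⟨t, ht1, ht2, ht3⟩ := ih hk
      by_cases hc : curF g (k + 1) ≤ mF g k
      · exact ⟨t, ht1, by omega, by simp only [mF]; omega⟩
      · exact ⟨k + 1, by omega, le_rfl, by simp only [mF]; omega⟩

theorem rF_succ (g : ℕ → Int) (N i : ℕ) (hN : 2 ≤ N) (h : i ≤ N - 2) :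
    rF g N i = if g i < g (i + 1) then rF g N (i + 1) + 1 else 1 := by
  unfold rF
  have h1 : N - 1 - i = (N - 2 - i) + 1 := by omega
  have h2 : N - 2 - (N - 2 - i) = i := by omega
  have h3 : N - 1 - (N - 2 - i) = i + 1 := by omega
  have h4 : N - 1 - (i + 1) = N - 2 - i := by omega
  rw [h1, rlF, h2, h3, h4]

theorem rlF_ge_one (g : ℕ → Int) (N j : ℕ) : 1 ≤ rlF g N j := by
  cases j with
  | zero => simp [rlF]
  | succ k =>
    have := rlF_ge_one g N k
    simp only [rlF]; split <;> omega

theorem rF_ge_one (g : ℕ → Int) (N i : ℕ) : 1 ≤ rF g N i := rlF_ge_one g N _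

theorem rF_last (g : ℕ → Int) (N i : ℕ) (h : N - 1 ≤ i) : rF g N i = 1 := by
  unfold rF; have : N - 1 - i = 0 := by omega
  rw [this]; rfl

theorem rF_two (g : ℕ → Int) (N i : ℕ) (h : 2 ≤ rF g N i) :
    g i < g (i + 1) ∧ rF g N (i + 1) = rF g N i - 1 := by
  by_cases hi : N - 1 ≤ i
  · rw [rF_last g N i hi] at h; omega
  · have hN : 2 ≤ N := by omega
    rw [rF_succ g N i hN (by omega)] at h
    rw [rF_succ g N i hN (by omega)]
    split at h
    · next hg => rw [if_pos hg]; exact ⟨hg, by omega⟩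
    · omega

theorem rlF_le (g : ℕ → Int) (N j : ℕ) : rlF g N j ≤ (j : Int) + 1 := by
  induction j with
  | zero => simp [rlF]
  | succ k ih => simp only [rlF]; split <;> push_cast <;> omega

theorem rF_le (g : ℕ → Int) (N i : ℕ) (hN : 1 ≤ N) (h : i ≤ N - 1) : rF g N i ≤ (N : Int) - i := by
  have h2 := rlF_le g N (N - 1 - i)
  have h3 : ((N - 1 - i : ℕ) : Int) = (N : Int) - 1 - i := by omega
  unfold rF
  omega

theorem cur_run_le_mF (g : ℕ → Int) (N : ℕ) (hN : 2 ≤ N) :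
    ∀ d i, i + d = N - 1 → curF g i + rF g N i - 1 ≤ mF g (N - 1) := by
  intro d
  induction d with
  | zero =>
    intro i hi
    rw [rF_last g N i (by omega)]
    rcases Nat.eq_zero_or_pos i with h0 | h0
    · have : N = 1 := by omega
      omega
    · have := curF_le_mF g (j := N - 1) h0 (by omega)
      omega
  | succ d ih =>
    intro i hi
    rw [rF_succ g N i hN (by omega)]
    split
    · next hg =>
      have hc : curF g (i + 1) = curF g i + 1 := by simp [curF, hg]
      have := ih (i + 1) (by omega)
      omega
    · rcases Nat.eq_zero_or_pos i with h0 | h0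
      · subst h0
        have h1 := mF_ge_one g (show 1 ≤ N - 1 by omega)
        simp only [curF]; omega
      · have := curF_le_mF g (j := N - 1) h0 (by omega); omega
-- aF at i+1 equals curF at i+1 unfolded; candidates lemmas
theorem aF_ge_two (g : ℕ → Int) (i : ℕ) : 2 ≤ aF g (i + 1) := by
  simp only [aF]
  split <;> split <;> simp

theorem aF_ge_cur (g : ℕ → Int) (i : ℕ) : curF g i ≤ aF g i := by
  cases i with
  | zero => simp [curF, aF]
  | succ j =>
    have h : curF g (j + 1) = if g j < g (j + 1) then curF g j + 1 else 1 := rfl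
    simp only [aF]
    split <;> split <;> rw [h] <;> simp <;> split <;> omega

theorem aF_inc_ge (g : ℕ → Int) (j : ℕ) (hg : g j < g (j + 1)) :
    aF g j + 1 ≤ aF g (j + 1) := by
  simp only [aF, if_pos hg]
  split <;> simp

theorem aF_gap_ge (g : ℕ → Int) (j : ℕ) (h : g (j + 1) - g (j - 1) ≥ 2) :
    bF g j + 1 ≤ aF g (j + 1) := by
  simp only [aF, if_pos (Or.inr h)]
  split <;> simp

theorem ansBF_mono (g : ℕ → Int) {i j : ℕ} (h : i ≤ j) : ansBF g i ≤ ansBF g j := by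
  induction j with
  | zero => interval_cases i; rfl
  | succ k ih =>
    rcases Nat.le_succ_iff.mp h with h' | h'
    · exact le_trans (ih h') (le_trans (le_max_left _ _) (le_max_left _ _))
    · subst h'; rfl

theorem aF_le_ansBF (g : ℕ → Int) {i j : ℕ} (h1 : 1 ≤ i) (h2 : i ≤ j) : aF g i ≤ ansBF g j := by
  have h3 : aF g i ≤ ansBF g i := by
    cases i with
    | zero => omega
    | succ k => exact le_trans (le_max_right _ _) (le_max_left _ _)
  exact le_trans h3 (ansBF_mono g h2)

theorem bF_le_ansBF (g : ℕ → Int) {i j : ℕ} (h1 : 1 ≤ i) (h2 : i ≤ j) : bF g i ≤ ansBF g j := by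
  have h3 : bF g i ≤ ansBF g i := by
    cases i with
    | zero => omega
    | succ k => exact le_max_right _ _
  exact le_trans h3 (ansBF_mono g h2)

theorem base_ge_mF (g : ℕ → Int) (N : ℕ) : mF g (N - 1) ≤ baseF g N := by
  unfold baseF; split <;> omega

theorem base_ge_two (g : ℕ → Int) (N : ℕ) (hN : 2 ≤ N) : 2 ≤ baseF g N := by
  have h1 := mF_ge_one g (show 1 ≤ N - 1 by omega)
  unfold baseF; split <;> omega

theorem bF_le_base (g : ℕ → Int) (N i : ℕ) (hN : 2 ≤ N) (h1 : 1 ≤ i) (h2 : i ≤ N - 1) :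
    bF g i ≤ baseF g N := by
  obtain ⟨j, rfl⟩ : ∃ j, i = j + 1 := ⟨i - 1, by omega⟩
  show curF g j + 1 ≤ baseF g N
  unfold baseF
  split
  · next hlt =>
    rcases Nat.eq_zero_or_pos j with h0 | h0
    · have h1 := mF_ge_one g (show 1 ≤ N - 1 by omega)
      subst h0; simp only [curF]; omega
    · have := curF_le_mF g (j := N - 1) h0 (by omega); omega
  · next hge =>
    have hc := curF_le g j
    omega

theorem tF_ge_base (g : ℕ → Int) (N : ℕ) (base : Int) (k : ℕ) : base ≤ tF g N base k := by
  induction k with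
  | zero => exact le_rfl
  | succ m ih => simp only [tF]; split <;> omega

theorem tF_mono (g : ℕ → Int) (N : ℕ) (base : Int) {k m : ℕ} (h : k ≤ m) :
    tF g N base k ≤ tF g N base m := by
  induction m with
  | zero => interval_cases k; rfl
  | succ j ih =>
    rcases Nat.le_succ_iff.mp h with h' | h'
    · refine le_trans (ih h') ?_
      simp only [tF]; split <;> omega
    · subst h'; rfl

theorem tF_ge_term (g : ℕ → Int) (N : ℕ) (base : Int) {k m : ℕ} (h1 : k + 1 ≤ m)
    (h2 : g (k + 2) - g k ≥ 2) : curF g k + 1 + rF g N (k + 2) ≤ tF g N base m := by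
  refine le_trans ?_ (tF_mono g N base h1)
  simp only [tF, if_pos h2]
  omega

theorem aF_ge_cur_succ (g : ℕ → Int) : ∀ i, 1 ≤ i → curF g i ≤ (i : Int) → curF g i + 1 ≤ aF g i := by
  intro i
  induction i with
  | zero => omega
  | succ j ih =>
    intro _ h
    by_cases hg : g j < g (j + 1)
    · have hcur : curF g (j + 1) = curF g j + 1 := by simp [curF, hg]
      rcases Nat.eq_zero_or_pos j with h0 | h0
      · subst h0; simp only [curF] at hcur h; omega
      · have h1 := ih h0 (by push_cast at h ⊢; omega)
        have h2 := aF_inc_ge g j hg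
        omega
    · have hcur : curF g (j + 1) = 1 := by simp [curF, hg]
      have := aF_ge_two g j
      omega

theorem dir1 (g : ℕ → Int) (N : ℕ) (hN : 2 ≤ N) :
    ∀ i, 1 ≤ i → i ≤ N - 1 → aF g i + rF g N i - 1 ≤ tF g N (baseF g N) (N - 2) := by
  intro i
  induction i with
  | zero => omega
  | succ j ih =>
    intro _ hle
    have hbase := tF_ge_base g N (baseF g N) (N - 2)
    have hc1 : curF g (j + 1) + rF g N (j + 1) - 1 ≤ baseF g N :=
      le_trans (cur_run_le_mF g N hN (N - 1 - (j + 1)) (j + 1) (by omega)) (base_ge_mF g N)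
    have hrf1 : 1 ≤ rF g N (j + 1) := rF_ge_one g N (j + 1)
    have hc2 : rF g N (j + 1) + 1 ≤ baseF g N := by
      have h1 := cur_run_le_mF g N hN (N - 1 - (j + 1)) (j + 1) (by omega)
      have h2 := curF_ge_one g (j + 1)
      have h3 := rF_le g N (j + 1) (by omega) (by omega)
      unfold baseF
      split
      · omega
      · next hge => omega
    have hcur : curF g (j + 1) = if g j < g (j + 1) then curF g j + 1 else 1 := rfl
    -- the inc-extend candidate
    have hc3 : g j < g (j + 1) → aF g j + 1 + rF g N (j + 1) - 1 ≤ tF g N (baseF g N) (N - 2) := by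
      intro hg
      rcases Nat.eq_zero_or_pos j with h0 | h0
      · subst h0; simp only [aF]; omega
      · have hrs : rF g N j = rF g N (j + 1) + 1 := by
          rw [rF_succ g N j hN (by omega), if_pos hg]
        have := ih h0 (by omega)
        omega
    -- the gap candidate
    have hc4 : (j = 0 ∨ g (j + 1) - g (j - 1) ≥ 2) →
        bF g j + 1 + rF g N (j + 1) - 1 ≤ tF g N (baseF g N) (N - 2) := by
      rintro (h0 | hgap)
      · subst h0; simp only [bF]; omega
      · rcases Nat.eq_zero_or_pos j with h0 | h0
        · subst h0; simp only [bF]; omega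
        · have hbf : bF g j = curF g (j - 1) + 1 := by
            obtain ⟨u, rfl⟩ : ∃ u, j = u + 1 := ⟨j - 1, by omega⟩
            rfl
          have e1 : j - 1 + 2 = j + 1 := by omega
          have hgap' : g (j - 1 + 2) - g (j - 1) ≥ 2 := by rw [e1]; exact hgap
          have hterm := tF_ge_term g N (baseF g N) (k := j - 1) (m := N - 2) (by omega) hgap'
          rw [e1] at hterm
          omega
    simp only [aF]
    by_cases hg : g j < g (j + 1)
    · rw [hcur, if_pos hg] at hc1
      have h3 := hc3 hg
      by_cases hcond : j = 0 ∨ g (j + 1) - g (j - 1) ≥ 2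
      · have h4 := hc4 hcond
        simp only [if_pos hg, if_pos hcond]
        omega
      · simp only [if_pos hg, if_neg hcond]
        omega
    · rw [hcur, if_neg hg] at hc1
      by_cases hcond : j = 0 ∨ g (j + 1) - g (j - 1) ≥ 2
      · have h4 := hc4 hcond
        simp only [if_neg hg, if_pos hcond]
        omega
      · simp only [if_neg hg, if_neg hcond]
        omega

theorem dir1_le (g : ℕ → Int) (N : ℕ) (hN : 2 ≤ N) :
    ∀ k, k ≤ N - 1 → ansBF g k ≤ tF g N (baseF g N) (N - 2) := by
  intro k
  induction k with
  | zero =>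
    intro _
    have := base_ge_two g N hN
    have := tF_ge_base g N (baseF g N) (N - 2)
    simp only [ansBF]; omega
  | succ j ih =>
    intro h
    have h1 := dir1 g N hN (j + 1) (by omega) h
    have h2 := rF_ge_one g N (j + 1)
    have h3 := bF_le_base g N (j + 1) hN (by omega) h
    have h4 := tF_ge_base g N (baseF g N) (N - 2)
    have h5 := ih (by omega)
    simp only [ansBF]; omega

theorem chain (g : ℕ → Int) (N : ℕ) :
    ∀ (m i : ℕ), 1 ≤ i → (m : Int) ≤ rF g N i - 1 →
      aF g i + (m : Int) ≤ aF g (i + m) ∧ rF g N i - (m : Int) ≤ rF g N (i + m) := by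
  intro m
  induction m with
  | zero => intro i _ _; simp
  | succ m ih =>
    intro i hi hm
    obtain ⟨ha, hr⟩ := ih i hi (by push_cast at hm ⊢; omega)
    have h2 : 2 ≤ rF g N (i + m) := by push_cast at hm; omega
    obtain ⟨hg, hrs⟩ := rF_two g N (i + m) h2
    have ha2 := aF_inc_ge g (i + m) hg
    have e : i + (m + 1) = (i + m) + 1 := by omega
    rw [e]
    push_cast
    constructor <;> omega

theorem base_le_ansBF (g : ℕ → Int) (N : ℕ) (hN : 2 ≤ N) :
    baseF g N ≤ ansBF g (N - 1) := by
  obtain ⟨t, ht1, ht2, ht3⟩ := mF_attained g (show 1 ≤ N - 1 by omega)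
  unfold baseF
  split
  · next hlt =>
    by_cases hcase : t ≤ N - 2
    · have hbf : bF g (t + 1) = curF g t + 1 := rfl
      have := bF_le_ansBF g (i := t + 1) (j := N - 1) (by omega) (by omega)
      omega
    · have ht : t = N - 1 := by omega
      subst ht
      have hcle : curF g (N - 1) ≤ ((N - 1 : ℕ) : Int) := by omega
      have h18 := aF_ge_cur_succ g (N - 1) (by omega) hcle
      have := aF_le_ansBF g (i := N - 1) (j := N - 1) (by omega) le_rfl
      omega
  · next hge =>
    have hc := curF_le g t
    have ht : t = N - 1 := by
      by_contra hne
      have : (t : Int) + 1 < (N : Int) := by omega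
      omega
    subst ht
    have h1 := aF_ge_cur g (N - 1)
    have := aF_le_ansBF g (i := N - 1) (j := N - 1) (by omega) le_rfl
    omega

theorem term_le_ansBF (g : ℕ → Int) (N : ℕ) (hN : 2 ≤ N) (k : ℕ) (hk : k + 1 ≤ N - 2)
    (hgap : g (k + 2) - g k ≥ 2) :
    curF g k + 1 + rF g N (k + 2) ≤ ansBF g (N - 1) := by
  have hr1 := rF_ge_one g N (k + 2)
  set m := (rF g N (k + 2) - 1).toNat with hmdef
  have hm : (m : Int) = rF g N (k + 2) - 1 := by omega
  have hgap2 : bF g (k + 1) + 1 ≤ aF g (k + 2) := by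
    refine aF_gap_ge g (k + 1) ?_
    have e : k + 1 - 1 = k := by omega
    rw [e]; exact hgap
  have hbf : bF g (k + 1) = curF g k + 1 := rfl
  obtain ⟨hch, _⟩ := chain g N m (k + 2) (by omega) (by omega)
  have hrle := rF_le g N (k + 2) (by omega) (by omega)
  have hidx : k + 2 + m ≤ N - 1 := by push_cast at hrle; omega
  have := aF_le_ansBF g (i := k + 2 + m) (j := N - 1) (by omega) hidx
  omega

theorem dir2 (g : ℕ → Int) (N : ℕ) (hN : 2 ≤ N) :
    ∀ k, k ≤ N - 2 → tF g N (baseF g N) k ≤ ansBF g (N - 1) := by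
  intro k
  induction k with
  | zero => intro _; exact base_le_ansBF g N hN
  | succ j ih =>
    intro h
    have h1 := ih (by omega)
    simp only [tF]
    split
    · next hgap =>
      have := term_le_ansBF g N hN j (by omega) hgap
      omega
    · exact h1

theorem main_eq (g : ℕ → Int) (N : ℕ) (hN : 2 ≤ N) :
    tF g N (baseF g N) (N - 2) = ansBF g (N - 1) :=
  le_antisymm (dir2 g N hN (N - 2) le_rfl) (dir1_le g N hN (N - 1) le_rfl)
theorem llF_getD (g : ℕ → Int) (N k t : ℕ) (ht : t < N) :
    (llF g N k).getD t 0 = if t ≤ k then curF g t else 1 := by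
  simp [llF, List.getD_eq_getElem?_getD, ht]

theorem rrF_getD (g : ℕ → Int) (N j t : ℕ) (ht : t < N) :
    (rrF g N j).getD t 0 = if j ≤ t then rF g N t else 1 := by
  simp [rrF, List.getD_eq_getElem?_getD, ht]

theorem llF_zero (g : ℕ → Int) (N : ℕ) : llF g N 0 = List.replicate N 1 := by
  apply List.ext_getElem
  · simp [llF]
  · intro t h1 h2
    simp only [llF, List.getElem_map, List.getElem_range, List.getElem_replicate] at *
    rcases Nat.eq_zero_or_pos t with h0 | h0
    · subst h0; simp [curF]
    · rw [if_neg (by omega)]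

theorem rrF_last (g : ℕ → Int) (N : ℕ) : rrF g N (N - 1) = List.replicate N 1 := by
  apply List.ext_getElem
  · simp [rrF]
  · intro t h1 h2
    simp only [rrF, List.length_map, List.length_range] at h1
    simp only [rrF, List.getElem_map, List.getElem_range, List.getElem_replicate]
    by_cases hc : N - 1 ≤ t
    · rw [if_pos hc, rF_last g N t hc]
    · rw [if_neg hc]

theorem foldA1_step (sequence : List Int) (N k : ℕ) (hN : 2 ≤ N) (h1 : 1 ≤ k) (h2 : k ≤ N - 1) :
    pvAStep1 sequence (llF (fun u => sequence.getD u 0) N (k - 1), mF (fun u => sequence.getD u 0) (k - 1)) (k : Int)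
      = (llF (fun u => sequence.getD u 0) N k, mF (fun u => sequence.getD u 0) k) := by
  set g : ℕ → Int := fun u => sequence.getD u 0 with hg
  have e1 : (k : Int) - 1 = ((k - 1 : ℕ) : Int) := by omega
  have hcur : curF g k = if g (k - 1) < g k then curF g (k - 1) + 1 else 1 := by
    obtain ⟨u, rfl⟩ : ∃ u, k = u + 1 := ⟨k - 1, by omega⟩
    simp only [Nat.add_sub_cancel]
    rfl
  have hllnew : (if g (k - 1) < g k
      then PySem.List.pySetD (llF g N (k - 1)) (k : Int) (PySem.List.pyGetD (llF g N (k - 1)) ((k : Int) - 1) 0 + 1)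
      else llF g N (k - 1)) = llF g N k := by
    rw [e1]
    rw [PySem.List.pyGetD_natCast, PySem.List.pySetD_natCast]
    rw [llF_getD g N (k - 1) (k - 1) (by omega), if_pos le_rfl]
    split
    · next hgk =>
      apply List.ext_getElem
      · simp [llF]
      · intro t ht1 ht2
        simp only [llF, List.length_map, List.length_range] at ht1 ht2
        simp only [llF, List.getElem_set, List.getElem_map, List.getElem_range]
        by_cases hc : k = t
        · subst hc
          rw [if_pos rfl, if_pos le_rfl, hcur, if_pos hgk]
        · rw [if_neg hc]
          by_cases hc2 : t ≤ k - 1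
          · rw [if_pos hc2, if_pos (by omega)]
          · rw [if_neg hc2, if_neg (by omega)]
    · next hgk =>
      apply List.ext_getElem
      · simp [llF]
      · intro t ht1 ht2
        simp only [llF, List.length_map, List.length_range] at ht1 ht2
        simp only [llF, List.getElem_map, List.getElem_range]
        by_cases hc : t = k
        · subst hc
          rw [if_pos le_rfl, if_neg (by omega), hcur, if_neg hgk]
        · by_cases hc2 : t ≤ k - 1
          · rw [if_pos hc2, if_pos (by omega)]
          · rw [if_neg hc2, if_neg (by omega)]
  have hget : (llF g N k).getD k 0 = curF g k := by
    rw [llF_getD g N k k (by omega), if_pos le_rfl]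
  have hmf : mF g k = max (mF g (k - 1)) (curF g k) := by
    obtain ⟨u, rfl⟩ : ∃ u, k = u + 1 := ⟨k - 1, by omega⟩
    simp only [Nat.add_sub_cancel]
    rfl
  unfold pvAStep1
  simp only [e1, PySem.List.pyGetD_natCast, PySem.List.pySetD_natCast] at hllnew ⊢
  simp only [hg] at hllnew hget hmf ⊢
  rw [hllnew, hget, hmf]

theorem foldA1 (sequence : List Int) (N : ℕ) (hN : 2 ≤ N) :
    ∀ k, 1 ≤ k → k ≤ N →
    (PySem.List.pyRange 1 (k : Int) 1).foldl (pvAStep1 sequence) (List.replicate N 1, 0)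
      = (llF (fun u => sequence.getD u 0) N (k - 1), mF (fun u => sequence.getD u 0) (k - 1)) := by
  intro k
  induction k with
  | zero => omega
  | succ j ih =>
    intro _ hle
    rcases Nat.eq_zero_or_pos j with h0 | h0
    · subst h0
      rw [PySem.List.pyRange_one_eq_nil (by norm_num)]
      simp only [List.foldl_nil, Nat.sub_self]
      rw [llF_zero]
      rfl
    · have e : ((j + 1 : ℕ) : Int) = (j : Int) + 1 := by push_cast; ring
      rw [e, PySem.List.pyRange_one_succ_right (by omega), List.foldl_append]
      rw [ih h0 (by omega)]
      simp only [List.foldl_cons, List.foldl_nil]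
      have := foldA1_step sequence N j hN h0 (by omega)
      rw [this]
      simp

theorem foldA2_step (sequence : List Int) (N j : ℕ) (hN : 2 ≤ N) (h2 : j ≤ N - 2) :
    pvAStep2 sequence (rrF (fun u => sequence.getD u 0) N (j + 1)) (j : Int)
      = rrF (fun u => sequence.getD u 0) N j := by
  set g : ℕ → Int := fun u => sequence.getD u 0 with hg
  have e1 : (j : Int) + 1 = ((j + 1 : ℕ) : Int) := by push_cast; ring
  have hrget : (rrF g N (j + 1)).getD (j + 1) 0 = rF g N (j + 1) := by
    rw [rrF_getD g N (j + 1) (j + 1) (by omega), if_pos le_rfl]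
  have hrs := rF_succ g N j hN h2
  have hnew : (if g j < g (j + 1)
      then (rrF g N (j + 1)).set j (rF g N (j + 1) + 1)
      else rrF g N (j + 1)) = rrF g N j := by
    split
    · next hgk =>
      apply List.ext_getElem
      · simp [rrF]
      · intro t ht1 ht2
        simp only [rrF, List.length_map, List.length_range] at ht1 ht2
        simp only [rrF, List.getElem_set, List.getElem_map, List.getElem_range]
        by_cases hc : j = t
        · subst hc
          rw [if_pos rfl, if_pos le_rfl, hrs, if_pos hgk]
        · rw [if_neg hc]
          by_cases hc2 : j + 1 ≤ t
          · rw [if_pos hc2, if_pos (by omega)]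
          · rw [if_neg hc2, if_neg (by omega)]
    · next hgk =>
      apply List.ext_getElem
      · simp [rrF]
      · intro t ht1 ht2
        simp only [rrF, List.length_map, List.length_range] at ht1 ht2
        simp only [rrF, List.getElem_map, List.getElem_range]
        by_cases hc : t = j
        · subst hc
          rw [if_neg (by omega), if_pos le_rfl, hrs, if_neg hgk]
        · by_cases hc2 : j + 1 ≤ t
          · rw [if_pos hc2, if_pos (by omega)]
          · rw [if_neg hc2, if_neg (by omega)]
  unfold pvAStep2
  simp only [e1, PySem.List.pyGetD_natCast, PySem.List.pySetD_natCast]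
  simp only [gt_iff_lt]
  simp only [hg] at hrget hnew ⊢
  rw [hrget, hnew]

theorem foldA2 (sequence : List Int) (N : ℕ) (hN : 2 ≤ N) :
    ∀ j, j ≤ N - 1 →
    (PySem.List.pyRange ((j : Int) - 1) (-1) (-1)).foldl (pvAStep2 sequence)
        (rrF (fun u => sequence.getD u 0) N j)
      = rrF (fun u => sequence.getD u 0) N 0 := by
  intro j
  induction j with
  | zero =>
    intro _
    rw [PySem.List.pyRange_neg_one_eq_nil (by norm_num)]
    rfl
  | succ i ih =>
    intro h
    have e : ((i + 1 : ℕ) : Int) - 1 = (i : Int) := by push_cast; ring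
    rw [e, PySem.List.pyRange_neg_one_cons (by omega)]
    simp only [List.foldl_cons]
    rw [foldA2_step sequence N i hN (by omega)]
    have e2 : (i : Int) - 1 = ((i : ℕ) : Int) - 1 := rfl
    exact ih (by omega)

theorem foldA3 (sequence : List Int) (N : ℕ) (hN : 2 ≤ N) (base : Int) :
    ∀ k, k ≤ N - 2 →
    (PySem.List.pyRange 1 ((k : Int) + 1) 1).foldl
      (pvAStep3 sequence (llF (fun u => sequence.getD u 0) N (N - 1)) (rrF (fun u => sequence.getD u 0) N 0)) base
      = tF (fun u => sequence.getD u 0) N base k := by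
  set g : ℕ → Int := fun u => sequence.getD u 0 with hg
  intro k
  induction k with
  | zero =>
    intro _
    rw [PySem.List.pyRange_one_eq_nil (by norm_num)]
    rfl
  | succ j ih =>
    intro h
    have e : ((j + 1 : ℕ) : Int) + 1 = ((j : Int) + 1) + 1 := by push_cast; ring
    rw [e, PySem.List.pyRange_one_succ_right (by omega), List.foldl_append]
    rw [ih (by omega)]
    simp only [List.foldl_cons, List.foldl_nil]
    unfold pvAStep3
    have e1 : (j : Int) + 1 + 1 = ((j + 2 : ℕ) : Int) := by push_cast; ring
    have e2 : (j : Int) + 1 - 1 = ((j : ℕ) : Int) := by ring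
    rw [e1, e2]
    simp only [PySem.List.pyGetD_natCast]
    have hl : (llF g N (N - 1)).getD j 0 = curF g j := by
      rw [llF_getD g N (N - 1) j (by omega), if_pos (by omega)]
    have hr : (rrF g N 0).getD (j + 2) 0 = rF g N (j + 2) := by
      rw [rrF_getD g N 0 (j + 2) (by omega), if_pos (by omega)]
    simp only [hg] at hl hr
    rw [hl, hr]
    show _ = tF g N base (j + 1)
    simp only [tF, hg]

theorem foldB (sequence : List Int) (N : ℕ) :
    ∀ k, k ≤ N - 1 →
    (PySem.List.pyRange 1 ((k : Int) + 1) 1).foldl (pvBStep sequence) (0, 1, 1, 1)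
      = (ansBF (fun u => sequence.getD u 0) k, curF (fun u => sequence.getD u 0) k,
         aF (fun u => sequence.getD u 0) k, bF (fun u => sequence.getD u 0) k) := by
  set g : ℕ → Int := fun u => sequence.getD u 0 with hg
  intro k
  induction k with
  | zero =>
    intro _
    rw [PySem.List.pyRange_one_eq_nil (by norm_num)]
    rfl
  | succ j ih =>
    intro h
    have e : ((j + 1 : ℕ) : Int) + 1 = ((j : Int) + 1) + 1 := by push_cast; ring
    rw [e, PySem.List.pyRange_one_succ_right (by omega), List.foldl_append]
    rw [ih (by omega)]
    simp only [List.foldl_cons, List.foldl_nil]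
    unfold pvBStep
    have e1 : (j : Int) + 1 - 1 = ((j : ℕ) : Int) := by ring
    have e2 : (j : Int) + 1 = ((j + 1 : ℕ) : Int) := by push_cast; ring
    rw [e1, e2]
    simp only [PySem.List.pyGetD_natCast]
    -- condition bridging for the gap test
    have hcond : (((j + 1 : ℕ) : Int) = 1 ∨
        sequence.getD (j + 1) 0 - PySem.List.pyGetD sequence (((j + 1 : ℕ) : Int) - 2) 0 ≥ 2)
        ↔ (j = 0 ∨ g (j + 1) - g (j - 1) ≥ 2) := by
      rcases Nat.eq_zero_or_pos j with h0 | h0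
      · subst h0
        constructor <;> intro <;> exact Or.inl (by norm_num)
      · have e3 : ((j + 1 : ℕ) : Int) - 2 = ((j - 1 : ℕ) : Int) := by omega
        rw [e3, PySem.List.pyGetD_natCast]
        constructor
        · rintro (hx | hx)
          · exfalso; omega
          · exact Or.inr hx
        · rintro (hx | hx)
          · exfalso; omega
          · exact Or.inr hx
    rw [if_congr hcond rfl rfl]
    -- now all components
    have hcur : curF g (j + 1) = if g j < g (j + 1) then curF g j + 1 else 1 := rfl
    have hbf : bF g (j + 1) = curF g j + 1 := rfl
    have haf : aF g (j + 1) =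
        (if j = 0 ∨ g (j + 1) - g (j - 1) ≥ 2
         then max (if g j < g (j + 1)
                   then max (max (if g j < g (j + 1) then curF g j + 1 else 1) 2) (aF g j + 1)
                   else max (if g j < g (j + 1) then curF g j + 1 else 1) 2) (bF g j + 1)
         else (if g j < g (j + 1)
               then max (max (if g j < g (j + 1) then curF g j + 1 else 1) 2) (aF g j + 1)
               else max (if g j < g (j + 1) then curF g j + 1 else 1) 2)) := rfl
    have hansb : ansBF g (j + 1) = max (max (ansBF g j) (aF g (j + 1))) (bF g (j + 1)) := rfl
    simp only [hg] at hcur hbf haf hansb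
    rw [hansb, haf, hcur, hbf]
theorem ports_agree (n : Int) (sequence : List Int) :
    find_longest_increasing_subsegment_length n sequence
      = find_longest_increasing_subsegment_length_alt n sequence := by
  unfold find_longest_increasing_subsegment_length find_longest_increasing_subsegment_length_alt
  by_cases h1 : n = 1
  · rw [if_pos h1, if_pos h1]
  · rw [if_neg h1, if_neg h1]
    by_cases h2 : n ≤ 0
    · rw [PySem.List.pyRange_one_eq_nil (by omega),
        PySem.List.pyRange_one_eq_nil (show n - 1 ≤ 1 by omega),
        PySem.List.pyRange_neg_one_eq_nil (show n - 2 ≤ -1 by omega)]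
      simp only [List.foldl_nil]
      norm_num
      omega
    · -- n ≥ 2
      have hn2 : 2 ≤ n := by omega
      set N : ℕ := n.toNat with hNdef
      have hN : 2 ≤ N := by omega
      have hn : n = (N : Int) := by omega
      set g : ℕ → Int := fun u => sequence.getD u 0 with hg
      have hA1 := foldA1 sequence N hN N (by omega) le_rfl
      have hA2 := foldA2 sequence N hN (N - 1) le_rfl
      have hA3 := foldA3 sequence N hN (baseF g N) (N - 2) le_rfl
      have hB := foldB sequence N (N - 1) (by omega)
      rw [hn]
      have e5 : ((N - 1 : ℕ) : Int) + 1 = (N : Int) := by omega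
      rw [e5] at hB
      have e6 : ((N - 2 : ℕ) : Int) + 1 = (N : Int) - 1 := by omega
      rw [e6] at hA3
      have e7 : ((N - 1 : ℕ) : Int) - 1 = (N : Int) - 2 := by omega
      rw [e7] at hA2
      rw [hA1, hB]
      dsimp only
      have hbase : (if mF g (N - 1) < (N : Int) then mF g (N - 1) + 1 else mF g (N - 1)) = baseF g N := rfl
      simp only [hg] at hbase
      rw [hbase]
      rw [← rrF_last g N] -- replicate back to rrF
      simp only [hg] -- align g with the lambda form everywhere
      rw [hA2, hA3]
      exact main_eq (fun u => sequence.getD u 0) N hN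

-- ===== VERDICT (by name: the statement is the Claim_ definition above) =====
theorem find_longest_increasing_subsegment_length_spec : Claim_equal_find_longest_increasing_subsegment_length := by
  intro n sequence _ _
  unfold Spec_find_longest_increasing_subsegment_length
  exact ports_agree n sequence
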